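-- pv_equiv track=rewrite | github.com/Crulista/lilagames_apm_assignment | backend/main.py | detect_day_from_zip_path
-- ===== SOURCE A (Python) =====
-- def detect_day_from_zip_path(zip_internal_path):
--     """Extract day from the path INSIDE the zip, not the temp extraction path.
--     Example: 'player_data/February_10/abc.nakama-0' -> 'February_10'
--     """
--     parts = zip_internal_path.replace("\\", "/").split("/")
--     for p in parts:
--         # Match patterns like February_10, January_05, March_21, etc.
--         if "_" in p and any(month in p for month in
--             ["January","February","March","April","May","June",
--              "July","August","September","October","November","December"]):
--             return p
--         # Also match generic date-like folders (2026_02_10, etc.)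
--         if p.replace("_","").replace("-","").isdigit() and len(p) > 4:
--             return p
--     # Fallback: use the first non-root, non-file folder name
--     for p in parts:
--         if p and not p.startswith(".") and "." not in p and p != "player_data":
--             return p
--     return "Unknown"
-- ===== SOURCE B (Python) =====
-- MONTHS = ["January","February","March","April","May","June",
--           "July","August","September","October","November","December"]
--
-- def detect_day_from_zip_path(zip_internal_path):
--     """Single pass over the path parts: return the first date-like part
--     immediately, remembering the first fallback candidate on the way."""
--     fallback = None
--     for p in zip_internal_path.replace("\\", "/").split("/"):
--         if ("_" in p and any(m in p for m in MONTHS)) or \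
--            (p.replace("_", "").replace("-", "").isdigit() and len(p) > 4):
--             return p
--         if fallback is None and p and not p.startswith(".") \
--            and "." not in p and p != "player_data":
--             fallback = p
--     return fallback if fallback is not None else "Unknown"
-- ===== Notes on version B (the rewrite author's own statement) =====
-- stated objective: simpler
-- what changed: Replaces A's two separate scans of the parts list by a single pass that returns a date-like part immediately and records the first fallback candidate in a variable, returned after the loop.
import Mathlib
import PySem

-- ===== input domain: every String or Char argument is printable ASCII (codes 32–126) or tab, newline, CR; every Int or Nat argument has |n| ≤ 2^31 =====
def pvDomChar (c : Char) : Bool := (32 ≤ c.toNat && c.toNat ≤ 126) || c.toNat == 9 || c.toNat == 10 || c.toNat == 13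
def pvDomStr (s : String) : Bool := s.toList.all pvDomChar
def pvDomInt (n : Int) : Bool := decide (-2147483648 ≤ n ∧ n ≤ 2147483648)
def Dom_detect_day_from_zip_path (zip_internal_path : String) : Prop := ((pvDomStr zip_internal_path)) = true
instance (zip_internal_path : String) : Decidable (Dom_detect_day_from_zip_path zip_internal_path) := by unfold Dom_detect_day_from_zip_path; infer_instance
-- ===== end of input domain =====

-- B replaces A's two scans over the path parts by one pass that returns a date
-- part immediately and remembers the first fallback candidate (objective: simpler).

-- ===== PORT A =====
def pvMonths : List String :=
  ["January","February","March","April","May","June",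
   "July","August","September","October","November","December"]

-- first loop of A: first part matching either date pattern
def pvALoop1 : List String → Option String
  | [] => none
  | p :: rest =>
    if PySem.Str.isIn "_" p && pvMonths.any (fun m => PySem.Str.isIn m p) then some p
    else if PySem.Str.strIsdigit (PySem.Str.replace (PySem.Str.replace p "_" "") "-" "")
            && PySem.Str.len p > 4 then some p
    else pvALoop1 rest

-- second loop of A: first fallback folder name
def pvALoop2 : List String → Option String
  | [] => none
  | p :: rest =>
    if p ≠ "" && !PySem.Str.startswith p "." && !PySem.Str.isIn "." p && p ≠ "player_data"
    then some p else pvALoop2 rest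

-- s.split("/") with nonempty separator: split? returns some; .getD [] only makes it total
def pvParts (s : String) : List String :=
  (PySem.Str.split? (PySem.Str.replace s "\\" "/") "/").getD []

def detect_day_from_zip_path (zip_internal_path : String) : String :=
  let parts := pvParts zip_internal_path
  match pvALoop1 parts with
  | some p => p
  | none =>
    match pvALoop2 parts with
    | some p => p
    | none => "Unknown"

-- ===== PORT B =====
def pvBPrimary (p : String) : Bool :=
  (PySem.Str.isIn "_" p && pvMonths.any (fun m => PySem.Str.isIn m p))
  || (PySem.Str.strIsdigit (PySem.Str.replace (PySem.Str.replace p "_" "") "-" "")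
      && PySem.Str.len p > 4)

def pvBFallbackOk (p : String) : Bool :=
  p ≠ "" && !PySem.Str.startswith p "." && !PySem.Str.isIn "." p && p ≠ "player_data"

-- B's single pass, carrying the first fallback candidate
def pvBLoop : List String → Option String → String
  | [], fb => fb.getD "Unknown"
  | p :: rest, fb =>
    if pvBPrimary p then p
    else pvBLoop rest (if fb.isNone && pvBFallbackOk p then some p else fb)

def detect_day_from_zip_path_alt (zip_internal_path : String) : String :=
  pvBLoop (pvParts zip_internal_path) none

-- ===== PRECONDITION & SPEC =====
def Spec_detect_day_from_zip_path (zip_internal_path : String) (out : String) : Prop := out = detect_day_from_zip_path_alt zip_internal_path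
instance (zip_internal_path : String) (out : String) : Decidable (Spec_detect_day_from_zip_path zip_internal_path out) := by unfold Spec_detect_day_from_zip_path; infer_instance

-- ===== CLAIM (what is proved, stated in full; the proofs are below) =====
def Claim_equal_detect_day_from_zip_path : Prop := ∀ (zip_internal_path : String), Dom_detect_day_from_zip_path zip_internal_path → Spec_detect_day_from_zip_path zip_internal_path (detect_day_from_zip_path zip_internal_path)

-- ===== LEMMAS AND PROOFS =====

theorem pvALoop1_cons (p : String) (rest : List String) :
    pvALoop1 (p :: rest) = if pvBPrimary p then some p else pvALoop1 rest := by
  simp only [pvALoop1, pvBPrimary]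
  by_cases h1 : (PySem.Str.isIn "_" p && pvMonths.any (fun m => PySem.Str.isIn m p)) = true <;>
    by_cases h2 : (PySem.Str.strIsdigit (PySem.Str.replace (PySem.Str.replace p "_" "") "-" "")
                   && PySem.Str.len p > 4) = true <;> simp_all
  have hA : ¬(PySem.Chars.isIn ['_'] p.toList = true
      ∧ ∃ x ∈ pvMonths, PySem.Chars.isIn x.toList p.toList = true) := by
    rintro ⟨a, x, hx, hm⟩
    exact absurd hm (by simp [h1 a x hx])
  have hB : ¬(PySem.Chars.strIsdigit
        (PySem.Chars.replace (PySem.Chars.replace p.toList ['_'] []) ['-'] []) = true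
      ∧ 4 < p.length) := by
    rintro ⟨a, b⟩
    have := h2 a
    omega
  simp [hA, hB]

theorem pvALoop2_cons (p : String) (rest : List String) :
    pvALoop2 (p :: rest) = if pvBFallbackOk p then some p else pvALoop2 rest := rfl

-- B's loop result, characterised by A's two scans (the carried fallback wins over later ones)
theorem pvBLoop_eq (parts : List String) (fb : Option String) :
    pvBLoop parts fb
      = match pvALoop1 parts with
        | some p => p
        | none =>
          match fb with
          | some f => f
          | none =>
            match pvALoop2 parts with
            | some p => p
            | none => "Unknown" := by
  induction parts generalizing fb with
  | nil => cases fb <;> simp [pvBLoop, pvALoop1, pvALoop2, Option.getD]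
  | cons p rest ih =>
    rw [pvALoop1_cons, pvALoop2_cons]
    cases hp : pvBPrimary p with
    | true => simp [pvBLoop, hp]
    | false =>
      cases fb with
      | some f => simp [pvBLoop, hp, Option.isNone, ih]
      | none =>
        cases hf : pvBFallbackOk p with
        | true => simp [pvBLoop, hp, hf, Option.isNone, ih]
        | false => simp [pvBLoop, hp, hf, Option.isNone, ih]

-- ===== VERDICT (by name: the statement is the Claim_ definition above) =====
theorem detect_day_from_zip_path_spec : Claim_equal_detect_day_from_zip_path := by
  intro s _
  unfold Spec_detect_day_from_zip_path detect_day_from_zip_path detect_day_from_zip_path_alt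
  rw [pvBLoop_eq]
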